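-- pv_equiv track=rewrite | github.com/rivol/aoc2021 | src/day13.py | fold_map
-- ===== SOURCE A (Python) =====
-- from typing import List, Tuple
--
-- def make_grid(w, h, value) -> List[list]:
--     grid = []
--     for _ in range(h):
--         grid.append([value] * w)
--     return grid
--
-- def fold_map(map, w: int, h: int, axis: str, coord: int):
--     # each fold seems to fold the map exactly in half (i.e both halves are of equal size). we don't handle other cases.
--     new_w = w
--     new_h = h
--     if axis == "x":
--         assert coord * 2 + 1 == w
--         new_w = coord
--     elif axis == "y":
--         assert coord * 2 + 1 == h
--         new_h = coord
--     else:
--         raise Exception(f"invalid fold instruction {axis}={coord} for map size {w}x{h}")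
--
--     new_map = make_grid(new_w, new_h, None)
--     for y in range(new_h):
--         for x in range(new_w):
--             if axis == "x":
--                 new_map[y][x] = map[y][x] or map[y][w - x - 1]
--             if axis == "y":
--                 new_map[y][x] = map[y][x] or map[h - y - 1][x]
--
--     return new_map, new_w, new_h
-- ===== SOURCE B (Python) =====
-- def fold_map(map, w: int, h: int, axis: str, coord: int):
--     # B: copy the kept half first, then overlay the folded-away half onto it.
--     if axis == "x":
--         assert coord * 2 + 1 == w
--         new_w, new_h = coord, h
--         new_map = [[map[y][x] for x in range(new_w)] for y in range(new_h)]
--         for y in range(new_h):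
--             for xs in range(coord + 1, w):
--                 x = w - xs - 1
--                 new_map[y][x] = new_map[y][x] or map[y][xs]
--     elif axis == "y":
--         assert coord * 2 + 1 == h
--         new_w, new_h = w, coord
--         new_map = [[map[y][x] for x in range(new_w)] for y in range(new_h)]
--         for ys in range(coord + 1, h):
--             y = h - ys - 1
--             for x in range(new_w):
--                 new_map[y][x] = new_map[y][x] or map[ys][x]
--     else:
--         raise Exception(f"invalid fold instruction {axis}={coord} for map size {w}x{h}")
--     return new_map, new_w, new_h
-- ===== Notes on version B (the rewrite author's own statement) =====
-- stated objective: alternative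
-- what changed: A fills a fresh None-grid in one combined pass reading two source cells per kept position; B first copies the kept half of the grid verbatim and then runs a second pass over the folded-away half, OR-ing each folded cell onto its reflected position.
import Mathlib
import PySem

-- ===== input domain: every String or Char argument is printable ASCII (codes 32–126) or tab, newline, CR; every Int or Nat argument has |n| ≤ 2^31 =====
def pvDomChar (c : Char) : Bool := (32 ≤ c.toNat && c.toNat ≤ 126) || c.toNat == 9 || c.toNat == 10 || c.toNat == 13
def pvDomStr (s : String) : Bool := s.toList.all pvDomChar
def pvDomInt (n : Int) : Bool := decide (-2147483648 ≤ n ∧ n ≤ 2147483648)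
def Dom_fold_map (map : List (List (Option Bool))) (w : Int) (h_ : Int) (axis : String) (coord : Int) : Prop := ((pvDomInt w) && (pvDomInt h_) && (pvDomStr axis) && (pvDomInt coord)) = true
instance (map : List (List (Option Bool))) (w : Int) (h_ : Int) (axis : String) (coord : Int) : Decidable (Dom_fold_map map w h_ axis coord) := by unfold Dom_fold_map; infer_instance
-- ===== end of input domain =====

-- B changes the decomposition: instead of A's single pass computing each kept cell from two reads,
-- B copies the kept half verbatim and then overlays the folded-away half onto it (same cost, 'alternative').

-- Python `a or b` on cells (None/False/True): returns a if truthy (i.e. True), else b.  Exact.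
def pvOr (a b : Option Bool) : Option Bool := if a = some true then a else b

-- Python `map[y][x]`; total via a default — Pre_fold_map keeps every performed access in range.
def pvCell (map : List (List (Option Bool))) (y x : Int) : Option Bool :=
  PySem.List.pyGetD (PySem.List.pyGetD map y []) x none

-- ===== PORT A =====
-- body of A's inner loop (the two sequential `if axis == ...` assignments `new_map[y][x] = ...`)
def pvBodyA (map : List (List (Option Bool))) (w : Int) (h_ : Int) (axis : String) (y x : Int)
    (g : List (List (Option Bool))) : List (List (Option Bool)) :=
  let g := if axis = "x" then g.modify y.toNat (fun row => row.set x.toNat (pvOr (pvCell map y x) (pvCell map y (w - x - 1)))) else g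
  let g := if axis = "y" then g.modify y.toNat (fun row => row.set x.toNat (pvOr (pvCell map y x) (pvCell map (h_ - y - 1) x))) else g
  g

def fold_map (map : List (List (Option Bool))) (w : Int) (h_ : Int) (axis : String) (coord : Int) : List (List (Option Bool)) × Int × Int :=
  let new_w := if axis = "x" then coord else w
  let new_h := if axis = "y" then coord else h_
  -- make_grid(new_w, new_h, None)
  let init : List (List (Option Bool)) := List.replicate new_h.toNat (List.replicate new_w.toNat none)
  let g := (PySem.List.pyRange 0 new_h 1).foldl (fun g y =>
      (PySem.List.pyRange 0 new_w 1).foldl (fun g x => pvBodyA map w h_ axis y x g) g) init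
  (g, new_w, new_h)

-- ===== PORT B =====
-- overlay step of B's x-fold: new_map[y][w-xs-1] = new_map[y][w-xs-1] or map[y][xs]
def pvBodyBx (map : List (List (Option Bool))) (w : Int) (y xs : Int)
    (g : List (List (Option Bool))) : List (List (Option Bool)) :=
  g.modify y.toNat (fun row => row.modify (w - xs - 1).toNat (fun cur => pvOr cur (pvCell map y xs)))

-- overlay step of B's y-fold: new_map[h-ys-1][x] = new_map[h-ys-1][x] or map[ys][x]
def pvBodyBy (map : List (List (Option Bool))) (h_ : Int) (ys x : Int)
    (g : List (List (Option Bool))) : List (List (Option Bool)) :=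
  g.modify (h_ - ys - 1).toNat (fun row => row.modify x.toNat (fun cur => pvOr cur (pvCell map ys x)))

def fold_map_alt (map : List (List (Option Bool))) (w : Int) (h_ : Int) (axis : String) (coord : Int) : List (List (Option Bool)) × Int × Int :=
  if axis = "x" then
    -- phase 1: copy the kept left half
    let kept := (PySem.List.pyRange 0 h_ 1).map (fun y =>
        (PySem.List.pyRange 0 coord 1).map (fun x => pvCell map y x))
    -- phase 2: overlay the folded-away right half
    let g := (PySem.List.pyRange 0 h_ 1).foldl (fun g y =>
        (PySem.List.pyRange (coord + 1) w 1).foldl (fun g xs => pvBodyBx map w y xs g) g) kept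
    (g, coord, h_)
  else if axis = "y" then
    -- phase 1: copy the kept top half
    let kept := (PySem.List.pyRange 0 coord 1).map (fun y =>
        (PySem.List.pyRange 0 w 1).map (fun x => pvCell map y x))
    -- phase 2: overlay the folded-away bottom half
    let g := (PySem.List.pyRange (coord + 1) h_ 1).foldl (fun g ys =>
        (PySem.List.pyRange 0 w 1).foldl (fun g x => pvBodyBy map h_ ys x g) g) kept
    (g, w, coord)
  else (map, w, h_)  -- unreachable under Pre_: Python raises Exception here

-- ===== PRECONDITION & SPEC =====
-- Pre_ = exactly the inputs where the Python A returns: the axis is "x"/"y" (else: raise), the fold is an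
-- exact half fold (else: AssertionError), and every cell access performed by the loops is in range (else:
-- IndexError).  When the loops perform no access (kept half empty) no shape condition is needed.
def Pre_fold_map (map : List (List (Option Bool))) (w : Int) (h_ : Int) (axis : String) (coord : Int) : Prop :=
  (axis = "x" ∧ coord * 2 + 1 = w ∧
     (coord ≤ 0 ∨ (h_ ≤ (map.length : Int) ∧ ∀ row ∈ map.take h_.toNat, w ≤ (row.length : Int))))
  ∨ (axis = "y" ∧ coord * 2 + 1 = h_ ∧
     (w ≤ 0 ∨ coord ≤ 0 ∨ (h_ ≤ (map.length : Int) ∧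
        ∀ i : Nat, i < h_.toNat → i ≠ coord.toNat → w ≤ ((map.getD i []).length : Int))))
instance (map : List (List (Option Bool))) (w : Int) (h_ : Int) (axis : String) (coord : Int) : Decidable (Pre_fold_map map w h_ axis coord) := by unfold Pre_fold_map; infer_instance

def pvWitness_fold_map : List (List (Option Bool)) × Int × Int × String × Int :=
  ([[some true, none, some false]], 3, 1, "x", 1)

def Spec_fold_map (map : List (List (Option Bool))) (w : Int) (h_ : Int) (axis : String) (coord : Int) (out : List (List (Option Bool)) × Int × Int) : Prop := out = fold_map_alt map w h_ axis coord
instance (map : List (List (Option Bool))) (w : Int) (h_ : Int) (axis : String) (coord : Int) (out : List (List (Option Bool)) × Int × Int) : Decidable (Spec_fold_map map w h_ axis coord out) := by unfold Spec_fold_map; infer_instance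

-- ===== CLAIM (what is proved, stated in full; the proofs are below) =====
def Claim_equal_fold_map : Prop := ∀ (map : List (List (Option Bool))) (w : Int) (h_ : Int) (axis : String) (coord : Int), Dom_fold_map map w h_ axis coord → Pre_fold_map map w h_ axis coord → Spec_fold_map map w h_ axis coord (fold_map map w h_ axis coord)

-- ===== LEMMAS AND PROOFS =====

theorem pvSet_eq_modify {α : Type} (l : List α) (i : Nat) (v : α) :
    l.set i v = l.modify i (fun _ => v) := by
  induction l generalizing i with
  | nil => cases i <;> rfl
  | cons a t ih => cases i with
    | zero => rfl
    | succ n => simp [List.set, List.modify, ih]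

theorem pvFoldModify_length {ι α : Type} (l : List ι) (idx : ι → Nat) (F : ι → α → α) (r : List α) :
    (l.foldl (fun r i => r.modify (idx i) (F i)) r).length = r.length := by
  induction l generalizing r with
  | nil => rfl
  | cons a t ih => simp only [List.foldl_cons]; rw [ih, List.length_modify]

theorem pvFoldModify_getElem {ι α : Type} (l : List ι) (idx : ι → Nat) (F : ι → α → α) (r : List α)
    (p : Nat) (hp : p < r.length) :
    (l.foldl (fun r i => r.modify (idx i) (F i)) r)[p]'(by rw [pvFoldModify_length]; exact hp)
      = l.foldl (fun v i => if idx i = p then F i v else v) (r[p]'hp) := by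
  induction l generalizing r with
  | nil => rfl
  | cons a t ih =>
    simp only [List.foldl_cons]
    rw [ih (r.modify (idx a) (F a)) (by rw [List.length_modify]; exact hp)]
    congr 1
    rw [List.getElem_modify]

theorem pvFoldIf_no_hit {ι α : Type} (l : List ι) (idx : ι → Nat) (F : ι → α → α) (p : Nat) (v : α)
    (h : ∀ i ∈ l, idx i ≠ p) :
    l.foldl (fun v i => if idx i = p then F i v else v) v = v := by
  induction l generalizing v with
  | nil => rfl
  | cons a t ih =>
    simp only [List.foldl_cons, if_neg (h a (by simp))]
    exact ih _ (fun i hi => h i (by simp [hi]))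

theorem pvFoldModify_single {ι α : Type} (l1 l2 : List ι) (i0 : ι) (idx : ι → Nat) (F : ι → α → α)
    (r : List α) (p : Nat) (hp : p < r.length)
    (h1 : ∀ i ∈ l1, idx i ≠ p) (h2 : ∀ i ∈ l2, idx i ≠ p) (h0 : idx i0 = p) :
    ((l1 ++ i0 :: l2).foldl (fun r i => r.modify (idx i) (F i)) r)[p]'(by rw [pvFoldModify_length]; exact hp)
      = F i0 (r[p]'hp) := by
  rw [pvFoldModify_getElem, List.foldl_append, pvFoldIf_no_hit l1 idx F p _ h1,
      List.foldl_cons, if_pos h0, pvFoldIf_no_hit l2 idx F p _ h2]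

theorem pvFoldl_fn_congr {ι α : Type} (l : List ι) (f g : α → ι → α) (init : α)
    (h : ∀ a i, f a i = g a i) : l.foldl f init = l.foldl g init := by
  have : f = g := funext fun a => funext fun i => h a i
  rw [this]

theorem pvModify_id {α : Type} (r : List α) (j : Nat) : r.modify j (fun a => a) = r := by
  apply List.ext_getElem (by rw [List.length_modify])
  intro p h1 h2
  rw [List.getElem_modify]
  split <;> rfl

theorem pvModify_modify {α : Type} (r : List α) (j : Nat) (f g : α → α) :
    (r.modify j g).modify j f = r.modify j (fun a => f (g a)) := by
  apply List.ext_getElem (by rw [List.length_modify, List.length_modify, List.length_modify])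
  intro p h1 h2
  by_cases h : j = p <;> simp [h]

-- fold of modifies at one fixed row index = one modify with the folded row operation
theorem pvFoldModify_fuse {ι α : Type} (l : List ι) (j : Nat) (f : ι → α → α) (r : List α) :
    l.foldl (fun r i => r.modify j (f i)) r = r.modify j (fun a => l.foldl (fun a i => f i a) a) := by
  induction l generalizing r with
  | nil => simp only [List.foldl_nil]; rw [pvModify_id]
  | cons a t ih =>
    simp only [List.foldl_cons]
    rw [ih, pvModify_modify]


-- row-level x-equality: writing then folding the left half = copying it then overlaying the right half
theorem pvRowEqX (map : List (List (Option Bool))) (w coord y : Int) (heq : coord * 2 + 1 = w) :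
    (PySem.List.pyRange 0 coord 1).foldl
        (fun row x => row.modify x.toNat (fun _ => pvOr (pvCell map y x) (pvCell map y (w - x - 1))))
        (List.replicate coord.toNat none)
      = (PySem.List.pyRange (coord + 1) w 1).foldl
        (fun row xs => row.modify (w - xs - 1).toNat (fun cur => pvOr cur (pvCell map y xs)))
        ((PySem.List.pyRange 0 coord 1).map (fun x => pvCell map y x)) := by
  apply List.ext_getElem
  · rw [pvFoldModify_length, pvFoldModify_length]
    simp [PySem.List.length_pyRange_one]
  intro p h1 h2
  have hp : p < coord.toNat := by rw [pvFoldModify_length] at h1; simpa using h1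
  have hsplitB : PySem.List.pyRange (coord + 1) w 1
      = PySem.List.pyRange (coord + 1) (w - (p:Int) - 1) 1 ++ (w - (p:Int) - 1) :: PySem.List.pyRange ((w - (p:Int) - 1) + 1) w 1 := by
    rw [PySem.List.pyRange_one_append (coord + 1) (w - (p:Int) - 1) w (by omega) (by omega),
        PySem.List.pyRange_one_cons (a := w - (p:Int) - 1) (b := w) (by omega)]
  simp only [hsplitB]
  rw [pvFoldModify_single _ _ (w - (p:Int) - 1) (fun xs => (w - xs - 1).toNat) _
        (List.map (fun x => pvCell map y x) (PySem.List.pyRange 0 coord 1)) p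
        (by rw [List.length_map, PySem.List.length_pyRange_one]; omega)
        (fun i hi => by rcases PySem.List.mem_pyRange_one.mp hi with ⟨ha, hb⟩; beta_reduce; omega)
        (fun i hi => by rcases PySem.List.mem_pyRange_one.mp hi with ⟨ha, hb⟩; beta_reduce; omega)
        (by beta_reduce; omega)]
  simp only [List.getElem_map, PySem.List.getElem_pyRange_one, zero_add]
  have hsplitA : PySem.List.pyRange 0 coord 1
      = PySem.List.pyRange 0 (p:Int) 1 ++ (p:Int) :: PySem.List.pyRange ((p:Int) + 1) coord 1 := by
    rw [PySem.List.pyRange_one_append 0 (p:Int) coord (by omega) (by omega),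
        PySem.List.pyRange_one_cons (a := (p:Int)) (b := coord) (by omega)]
  simp only [hsplitA]
  rw [pvFoldModify_single _ _ ((p:Int)) (fun x => x.toNat) _ (List.replicate coord.toNat (none : Option Bool)) p
        (by simpa using hp)
        (fun i hi => by rcases PySem.List.mem_pyRange_one.mp hi with ⟨ha, hb⟩; beta_reduce; omega)
        (fun i hi => by rcases PySem.List.mem_pyRange_one.mp hi with ⟨ha, hb⟩; beta_reduce; omega)
        (by beta_reduce; omega)]

-- row-level y-equality: same column positions on both sides
theorem pvRowEqY (map : List (List (Option Bool))) (w y z : Int) :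
    (PySem.List.pyRange 0 w 1).foldl
        (fun row x => row.modify x.toNat (fun _ => pvOr (pvCell map y x) (pvCell map z x)))
        (List.replicate w.toNat none)
      = (PySem.List.pyRange 0 w 1).foldl
        (fun row x => row.modify x.toNat (fun cur => pvOr cur (pvCell map z x)))
        ((PySem.List.pyRange 0 w 1).map (fun x => pvCell map y x)) := by
  apply List.ext_getElem
  · rw [pvFoldModify_length, pvFoldModify_length]
    simp [PySem.List.length_pyRange_one]
  intro p h1 h2
  have hp : p < w.toNat := by rw [pvFoldModify_length] at h1; simpa using h1
  have hsplit : PySem.List.pyRange 0 w 1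
      = PySem.List.pyRange 0 (p:Int) 1 ++ (p:Int) :: PySem.List.pyRange ((p:Int) + 1) w 1 := by
    rw [PySem.List.pyRange_one_append 0 (p:Int) w (by omega) (by omega),
        PySem.List.pyRange_one_cons (a := (p:Int)) (b := w) (by omega)]
  simp only [hsplit]
  rw [pvFoldModify_single _ _ ((p:Int)) (fun x => x.toNat) _
        (List.map (fun x => pvCell map y x) (PySem.List.pyRange 0 (p:Int) 1 ++ (p:Int) :: PySem.List.pyRange ((p:Int) + 1) w 1)) p
        (by rw [List.length_map, List.length_append, List.length_cons,
                PySem.List.length_pyRange_one, PySem.List.length_pyRange_one]; omega)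
        (fun i hi => by rcases PySem.List.mem_pyRange_one.mp hi with ⟨ha, hb⟩; beta_reduce; omega)
        (fun i hi => by rcases PySem.List.mem_pyRange_one.mp hi with ⟨ha, hb⟩; beta_reduce; omega)
        (by beta_reduce; omega)]
  rw [pvFoldModify_single _ _ ((p:Int)) (fun x => x.toNat) _ (List.replicate w.toNat (none : Option Bool)) p
        (by simpa using hp)
        (fun i hi => by rcases PySem.List.mem_pyRange_one.mp hi with ⟨ha, hb⟩; beta_reduce; omega)
        (fun i hi => by rcases PySem.List.mem_pyRange_one.mp hi with ⟨ha, hb⟩; beta_reduce; omega)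
        (by beta_reduce; omega)]
  simp only [← hsplit]
  simp [PySem.List.getElem_pyRange_one]

theorem pvEqX (map : List (List (Option Bool))) (w h_ coord : Int) (heq : coord * 2 + 1 = w) :
    fold_map map w h_ "x" coord = fold_map_alt map w h_ "x" coord := by
  have hrowA : ∀ (y : Int) (g : List (List (Option Bool))),
      (PySem.List.pyRange 0 coord 1).foldl (fun g x => pvBodyA map w h_ "x" y x g) g
        = g.modify y.toNat (fun row => (PySem.List.pyRange 0 coord 1).foldl
            (fun row x => row.modify x.toNat (fun _ => pvOr (pvCell map y x) (pvCell map y (w - x - 1)))) row) := by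
    intro y g
    rw [pvFoldl_fn_congr _ _
        (fun g x => g.modify y.toNat (fun row => row.modify x.toNat (fun _ => pvOr (pvCell map y x) (pvCell map y (w - x - 1))))) g
        (by intro a i; simp [pvBodyA, pvSet_eq_modify])]
    exact pvFoldModify_fuse _ _ _ _
  have hrowB : ∀ (y : Int) (g : List (List (Option Bool))),
      (PySem.List.pyRange (coord + 1) w 1).foldl (fun g xs => pvBodyBx map w y xs g) g
        = g.modify y.toNat (fun row => (PySem.List.pyRange (coord + 1) w 1).foldl
            (fun row xs => row.modify (w - xs - 1).toNat (fun cur => pvOr cur (pvCell map y xs))) row) := by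
    intro y g
    rw [pvFoldl_fn_congr _ _
        (fun g xs => g.modify y.toNat (fun row => row.modify (w - xs - 1).toNat (fun cur => pvOr cur (pvCell map y xs)))) g
        (by intro a i; simp [pvBodyBx])]
    exact pvFoldModify_fuse _ _ _ _
  unfold fold_map fold_map_alt
  simp only [String.reduceEq, reduceIte, Prod.mk.injEq]
  refine ⟨?_, trivial⟩
  rw [pvFoldl_fn_congr _ _
      (fun g y => g.modify y.toNat (fun row => (PySem.List.pyRange 0 coord 1).foldl
        (fun row x => row.modify x.toNat (fun _ => pvOr (pvCell map y x) (pvCell map y (w - x - 1)))) row)) _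
      (fun g y => hrowA y g),
     pvFoldl_fn_congr _ _
      (fun g y => g.modify y.toNat (fun row => (PySem.List.pyRange (coord + 1) w 1).foldl
        (fun row xs => row.modify (w - xs - 1).toNat (fun cur => pvOr cur (pvCell map y xs))) row)) _
      (fun g y => hrowB y g)]
  apply List.ext_getElem
  · rw [pvFoldModify_length, pvFoldModify_length]
    simp [PySem.List.length_pyRange_one]
  intro q h1 h2
  have hq : q < h_.toNat := by rw [pvFoldModify_length] at h1; simpa using h1
  have hsplit : PySem.List.pyRange 0 h_ 1
      = PySem.List.pyRange 0 (q:Int) 1 ++ (q:Int) :: PySem.List.pyRange ((q:Int) + 1) h_ 1 := by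
    rw [PySem.List.pyRange_one_append 0 (q:Int) h_ (by omega) (by omega),
        PySem.List.pyRange_one_cons (a := (q:Int)) (b := h_) (by omega)]
  simp only [hsplit]
  rw [pvFoldModify_single _ _ ((q:Int)) (fun y => y.toNat) _
        (List.replicate h_.toNat (List.replicate coord.toNat (none : Option Bool))) q
        (by simpa using hq)
        (fun i hi => by rcases PySem.List.mem_pyRange_one.mp hi with ⟨ha, hb⟩; beta_reduce; omega)
        (fun i hi => by rcases PySem.List.mem_pyRange_one.mp hi with ⟨ha, hb⟩; beta_reduce; omega)
        (by beta_reduce; omega)]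
  rw [pvFoldModify_single _ _ ((q:Int)) (fun y => y.toNat) _
        (List.map (fun y => List.map (fun x => pvCell map y x) (PySem.List.pyRange 0 coord 1))
          (PySem.List.pyRange 0 (q:Int) 1 ++ (q:Int) :: PySem.List.pyRange ((q:Int) + 1) h_ 1)) q
        (by rw [List.length_map, List.length_append, List.length_cons,
                PySem.List.length_pyRange_one, PySem.List.length_pyRange_one]; omega)
        (fun i hi => by rcases PySem.List.mem_pyRange_one.mp hi with ⟨ha, hb⟩; beta_reduce; omega)
        (fun i hi => by rcases PySem.List.mem_pyRange_one.mp hi with ⟨ha, hb⟩; beta_reduce; omega)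
        (by beta_reduce; omega)]
  simp only [← hsplit]
  simp only [List.getElem_replicate, List.getElem_map, PySem.List.getElem_pyRange_one, zero_add]
  exact pvRowEqX map w coord (q:Int) heq

theorem pvEqY (map : List (List (Option Bool))) (w h_ coord : Int) (heq : coord * 2 + 1 = h_) :
    fold_map map w h_ "y" coord = fold_map_alt map w h_ "y" coord := by
  have hrowA : ∀ (y : Int) (g : List (List (Option Bool))),
      (PySem.List.pyRange 0 w 1).foldl (fun g x => pvBodyA map w h_ "y" y x g) g
        = g.modify y.toNat (fun row => (PySem.List.pyRange 0 w 1).foldl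
            (fun row x => row.modify x.toNat (fun _ => pvOr (pvCell map y x) (pvCell map (h_ - y - 1) x))) row) := by
    intro y g
    rw [pvFoldl_fn_congr _ _
        (fun g x => g.modify y.toNat (fun row => row.modify x.toNat (fun _ => pvOr (pvCell map y x) (pvCell map (h_ - y - 1) x)))) g
        (by intro a i; simp [pvBodyA, pvSet_eq_modify])]
    exact pvFoldModify_fuse _ _ _ _
  have hrowB : ∀ (ys : Int) (g : List (List (Option Bool))),
      (PySem.List.pyRange 0 w 1).foldl (fun g x => pvBodyBy map h_ ys x g) g
        = g.modify (h_ - ys - 1).toNat (fun row => (PySem.List.pyRange 0 w 1).foldl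
            (fun row x => row.modify x.toNat (fun cur => pvOr cur (pvCell map ys x))) row) := by
    intro ys g
    rw [pvFoldl_fn_congr _ _
        (fun g x => g.modify (h_ - ys - 1).toNat (fun row => row.modify x.toNat (fun cur => pvOr cur (pvCell map ys x)))) g
        (by intro a i; simp [pvBodyBy])]
    exact pvFoldModify_fuse _ _ _ _
  unfold fold_map fold_map_alt
  simp only [String.reduceEq, reduceIte, Prod.mk.injEq]
  refine ⟨?_, trivial⟩
  rw [pvFoldl_fn_congr _ _
      (fun g y => g.modify y.toNat (fun row => (PySem.List.pyRange 0 w 1).foldl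
        (fun row x => row.modify x.toNat (fun _ => pvOr (pvCell map y x) (pvCell map (h_ - y - 1) x))) row)) _
      (fun g y => hrowA y g),
     pvFoldl_fn_congr _ _
      (fun g ys => g.modify (h_ - ys - 1).toNat (fun row => (PySem.List.pyRange 0 w 1).foldl
        (fun row x => row.modify x.toNat (fun cur => pvOr cur (pvCell map ys x))) row)) _
      (fun g ys => hrowB ys g)]
  apply List.ext_getElem
  · rw [pvFoldModify_length, pvFoldModify_length]
    simp [PySem.List.length_pyRange_one]
  intro q h1 h2
  have hq : q < coord.toNat := by rw [pvFoldModify_length] at h1; simpa using h1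
  have hsplitB : PySem.List.pyRange (coord + 1) h_ 1
      = PySem.List.pyRange (coord + 1) (h_ - (q:Int) - 1) 1 ++ (h_ - (q:Int) - 1) :: PySem.List.pyRange ((h_ - (q:Int) - 1) + 1) h_ 1 := by
    rw [PySem.List.pyRange_one_append (coord + 1) (h_ - (q:Int) - 1) h_ (by omega) (by omega),
        PySem.List.pyRange_one_cons (a := h_ - (q:Int) - 1) (b := h_) (by omega)]
  simp only [hsplitB]
  rw [pvFoldModify_single _ _ (h_ - (q:Int) - 1) (fun ys => (h_ - ys - 1).toNat) _
        (List.map (fun y => List.map (fun x => pvCell map y x) (PySem.List.pyRange 0 w 1)) (PySem.List.pyRange 0 coord 1)) q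
        (by rw [List.length_map, PySem.List.length_pyRange_one]; omega)
        (fun i hi => by rcases PySem.List.mem_pyRange_one.mp hi with ⟨ha, hb⟩; beta_reduce; omega)
        (fun i hi => by rcases PySem.List.mem_pyRange_one.mp hi with ⟨ha, hb⟩; beta_reduce; omega)
        (by beta_reduce; omega)]
  simp only [List.getElem_map, PySem.List.getElem_pyRange_one, zero_add]
  have hsplitA : PySem.List.pyRange 0 coord 1
      = PySem.List.pyRange 0 (q:Int) 1 ++ (q:Int) :: PySem.List.pyRange ((q:Int) + 1) coord 1 := by
    rw [PySem.List.pyRange_one_append 0 (q:Int) coord (by omega) (by omega),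
        PySem.List.pyRange_one_cons (a := (q:Int)) (b := coord) (by omega)]
  simp only [hsplitA]
  rw [pvFoldModify_single _ _ ((q:Int)) (fun y => y.toNat) _
        (List.replicate coord.toNat (List.replicate w.toNat (none : Option Bool))) q
        (by simpa using hq)
        (fun i hi => by rcases PySem.List.mem_pyRange_one.mp hi with ⟨ha, hb⟩; beta_reduce; omega)
        (fun i hi => by rcases PySem.List.mem_pyRange_one.mp hi with ⟨ha, hb⟩; beta_reduce; omega)
        (by beta_reduce; omega)]
  simp only [List.getElem_replicate]
  exact pvRowEqY map w (q:Int) (h_ - (q:Int) - 1)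

-- ===== VERDICT (by name: the statement is the Claim_ definition above) =====
theorem fold_map_spec : Claim_equal_fold_map := by
  intro map w h_ axis coord _ hpre
  unfold Spec_fold_map
  rcases hpre with ⟨hax, heq, -⟩ | ⟨hax, heq, -⟩
  · subst hax; exact pvEqX map w h_ coord heq
  · subst hax; exact pvEqY map w h_ coord heq
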